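-- pv_equiv track=rewrite | github.com/agluszak/imperialism-decomp | src/imperialism_re/commands/apply_macos_vocab_wave.py | _select_classes_from_gap
-- ===== SOURCE A (Python) =====
-- def _select_classes_from_gap(gap_rows: list[dict[str, str]], top_classes: int) -> list[str]:
--     rank_map: dict[str, int] = {}
--     for row in gap_rows:
--         class_name = (row.get("class_name") or "").strip()
--         if not class_name:
--             continue
--         try:
--             rank = int((row.get("class_rank") or "").strip() or "999999")
--         except ValueError:
--             rank = 999999
--         prev = rank_map.get(class_name)
--         if prev is None or rank < prev:
--             rank_map[class_name] = rank
--     classes = [cls for cls, _rank in sorted(rank_map.items(), key=lambda x: (x[1], x[0]))]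
--     if top_classes > 0:
--         return classes[:top_classes]
--     return classes
-- ===== SOURCE B (Python) =====
-- def _select_classes_from_gap(gap_rows: list[dict[str, str]], top_classes: int) -> list[str]:
--     entries = []
--     for row in gap_rows:
--         name = (row.get("class_name") or "").strip()
--         if not name:
--             continue
--         try:
--             rank = int((row.get("class_rank") or "").strip() or "999999")
--         except ValueError:
--             rank = 999999
--         entries.append((name, rank))
--     names = list(dict.fromkeys(n for n, _ in entries))
--     pairs = sorted((min(r for n, r in entries if n == name), name) for name in names)
--     classes = [name for _, name in pairs]
--     return classes[:top_classes] if top_classes > 0 else classes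
-- ===== Notes on version B (the rewrite author's own statement) =====
-- stated objective: alternative
-- what changed: B drops A's running-min dict: it collects all (name, rank) entries, dedups the names in first-occurrence order, computes each name's minimum rank by a direct scan, and sorts the (rank, name) tuples once, instead of maintaining per-name minima incrementally in a dict keyed by name.
import Mathlib
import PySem

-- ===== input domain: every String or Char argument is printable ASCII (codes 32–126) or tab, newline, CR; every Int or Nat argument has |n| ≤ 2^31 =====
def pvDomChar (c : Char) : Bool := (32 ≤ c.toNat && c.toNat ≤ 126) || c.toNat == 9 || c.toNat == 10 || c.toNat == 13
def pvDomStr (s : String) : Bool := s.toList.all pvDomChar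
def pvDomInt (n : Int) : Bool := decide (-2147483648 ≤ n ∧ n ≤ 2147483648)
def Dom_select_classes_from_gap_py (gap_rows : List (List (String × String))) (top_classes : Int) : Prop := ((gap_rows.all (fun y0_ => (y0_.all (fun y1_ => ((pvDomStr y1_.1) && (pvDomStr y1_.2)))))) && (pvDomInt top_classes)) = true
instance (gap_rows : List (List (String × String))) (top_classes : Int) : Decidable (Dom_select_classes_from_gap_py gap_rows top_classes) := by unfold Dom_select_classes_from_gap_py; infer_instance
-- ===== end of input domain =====

-- B replaces A's running-min dict with: collect (name, rank) entries, dedup names, take each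
-- name's min rank by a scan, sort the (rank, name) pairs once (objective: alternative, same result).

-- shared row-parsing helpers (this parsing code is textually identical in both Pythons)
-- row.get(k): first-match lookup in the association list (exact for a Python dict rendered as such a list)
def pvRowGet (row : List (String × String)) (k : String) : Option String :=
  (row.find? (fun p => p.1 == k)).map Prod.snd

-- (row.get("class_name") or "").strip()   ('x or ""' maps None and "" to ""; strip is unchanged on "")
def pvRowName (row : List (String × String)) : String :=
  PySem.Str.strip ((pvRowGet row "class_name").getD "")

-- int((row.get("class_rank") or "").strip() or "999999") with ValueError -> 999999
def pvRowRank (row : List (String × String)) : Int :=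
  let s := PySem.Str.strip ((pvRowGet row "class_rank").getD "")
  (PySem.Int.ofStr? (if s = "" then "999999" else s)).getD 999999

-- ===== PORT A =====
-- loop body of A: keep the smaller rank per class name in a dict
def pvStepA (m : PySem.Dict String Int) (row : List (String × String)) : PySem.Dict String Int :=
  let class_name := pvRowName row
  if class_name = "" then m
  else
    let rank := pvRowRank row
    match m.get? class_name with
    | none => m.insert class_name rank
    | some prev => if rank < prev then m.insert class_name rank else m

def select_classes_from_gap_py (gap_rows : List (List (String × String))) (top_classes : Int) : List String :=
  let rank_map := gap_rows.foldl pvStepA PySem.Dict.empty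
  let classes := (PySem.List.sorted2 rank_map.items (fun x => x.2) (fun x => x.1)).map Prod.fst
  if top_classes > 0 then PySem.List.slice classes none (some top_classes) else classes

-- ===== PORT B =====
-- loop body of B: collect the (name, rank) entry of every valid row
def pvEntryStep (acc : List (String × Int)) (row : List (String × String)) : List (String × Int) :=
  let name := pvRowName row
  if name = "" then acc else acc ++ [(name, pvRowRank row)]

def pvEntries (gap_rows : List (List (String × String))) : List (String × Int) :=
  gap_rows.foldl pvEntryStep []

-- min(r for n, r in entries if n == name)  (called only with name drawn from entries, so the
-- scanned list is non-empty; .getD 0 only totalises the unreachable empty case)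
def pvMinRank (entries : List (String × Int)) (name : String) : Int :=
  (PySem.List.min? ((entries.filter (fun e => e.1 == name)).map Prod.snd) (fun r => r)).getD 0

def select_classes_from_gap_py_alt (gap_rows : List (List (String × String))) (top_classes : Int) : List String :=
  let entries := pvEntries gap_rows
  let names := PySem.List.dedup (entries.map Prod.fst)      -- list(dict.fromkeys(...))
  let pairs := names.map (fun n => (pvMinRank entries n, n))
  let sortedPairs := PySem.List.sorted2 pairs (fun x => x.1) (fun x => x.2)   -- sorted(tuples)
  let classes := sortedPairs.map Prod.snd
  if top_classes > 0 then PySem.List.slice classes none (some top_classes) else classes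

-- ===== PRECONDITION & SPEC =====
def Spec_select_classes_from_gap_py (gap_rows : List (List (String × String))) (top_classes : Int) (out : List String) : Prop := out = select_classes_from_gap_py_alt gap_rows top_classes
instance (gap_rows : List (List (String × String))) (top_classes : Int) (out : List String) : Decidable (Spec_select_classes_from_gap_py gap_rows top_classes out) := by unfold Spec_select_classes_from_gap_py; infer_instance

-- ===== CLAIM (what is proved, stated in full; the proofs are below) =====
def Claim_equal_select_classes_from_gap_py : Prop := ∀ (gap_rows : List (List (String × String))) (top_classes : Int), Dom_select_classes_from_gap_py gap_rows top_classes → Spec_select_classes_from_gap_py gap_rows top_classes (select_classes_from_gap_py gap_rows top_classes)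

-- ===== LEMMAS AND PROOFS =====

-- the pair A's dict stores for a name, expressed through B's entries
def pvF (es : List (String × Int)) : String → String × Int := fun n => (n, pvMinRank es n)

theorem pv_find?_beq (l : List String) (x : String) :
    l.find? (fun n => n == x) = if x ∈ l then some x else none := by
  induction l with
  | nil => simp
  | cons y ys ih =>
    by_cases hyx : y = x
    · subst hyx; simp
    · have hb : (y == x) = false := by simp [hyx]
      have hxy : ¬ x = y := fun h => hyx h.symm
      simp [hb, ih, hxy]

theorem pv_get?_of_inv (d : PySem.Dict String Int) (es : List (String × Int)) (name : String)
    (h : d.items = (PySem.List.dedup (es.map Prod.fst)).map (pvF es)) :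
    d.get? name = if name ∈ PySem.List.dedup (es.map Prod.fst)
                  then some (pvMinRank es name) else none := by
  show ((d.items.find? (fun p => p.1 == name)).map Prod.snd) = _
  rw [h, List.find?_map]
  have hcomp : ((fun p : String × Int => p.1 == name) ∘ pvF es) = (fun n => n == name) := rfl
  rw [hcomp, pv_find?_beq]
  split <;> simp [pvF]

theorem pv_min?_snoc (l : List Int) (r : Int) :
    PySem.List.min? (l ++ [r]) (fun x => x) =
      some ((PySem.List.min? l (fun x => x)).elim r (fun m => if r < m then r else m)) := by
  unfold PySem.List.min?
  rw [List.foldl_append]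
  generalize List.foldl _ (none : Option Int) l = o
  cases o with
  | none => simp
  | some m => by_cases hr : r < m <;> simp [hr]

theorem pvMinRank_snoc_ne (es : List (String × Int)) {n name : String} (rank : Int)
    (hne : name ≠ n) : pvMinRank (es ++ [(name, rank)]) n = pvMinRank es n := by
  unfold pvMinRank
  have : (((name, rank) : String × Int).1 == n) = false := by simp [hne]
  simp [List.filter_append, this]

theorem pvMinRank_snoc_self_not_mem (es : List (String × Int)) (name : String) (rank : Int)
    (h : name ∉ es.map Prod.fst) : pvMinRank (es ++ [(name, rank)]) name = rank := by
  have hf : es.filter (fun e => e.1 == name) = [] := by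
    rw [List.filter_eq_nil_iff]
    intro a ha
    simp only [beq_iff_eq]
    intro heq
    exact h (heq ▸ List.mem_map_of_mem ha)
  unfold pvMinRank
  simp [List.filter_append, hf, PySem.List.min?]

theorem pvMinRank_snoc_self_mem (es : List (String × Int)) (name : String) (rank : Int)
    (h : name ∈ es.map Prod.fst) :
    pvMinRank (es ++ [(name, rank)]) name =
      if rank < pvMinRank es name then rank else pvMinRank es name := by
  have hne : (es.filter (fun e => e.1 == name)).map Prod.snd ≠ [] := by
    obtain ⟨a, ha, hfa⟩ := List.mem_map.mp h
    have : a ∈ es.filter (fun e => e.1 == name) := by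
      rw [List.mem_filter]; exact ⟨ha, by simp [hfa]⟩
    simp only [ne_eq, List.map_eq_nil_iff, List.filter_eq_nil_iff]
    intro hnil; exact hnil a ha (by simp [hfa])
  unfold pvMinRank
  have hfilt : (es ++ [(name, rank)]).filter (fun e => e.1 == name) =
      es.filter (fun e => e.1 == name) ++ [(name, rank)] := by
    simp [List.filter_append]
  rw [hfilt, List.map_append]
  simp only [List.map_cons, List.map_nil]
  rw [pv_min?_snoc]
  cases hmin : PySem.List.min? ((es.filter (fun e => e.1 == name)).map Prod.snd) (fun x => x) with
  | none => exact absurd ((PySem.List.min?_eq_none_iff _ _).mp hmin) hne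
  | some m => by_cases hr : rank < m <;> simp [hr]

theorem pv_mem_dedup {l : List String} {x : String} :
    x ∈ PySem.List.dedup l ↔ x ∈ l := PySem.Set.mem_ofList l x

theorem pv_dedup_snoc (l : List String) (x : String) :
    PySem.List.dedup (l ++ [x]) = PySem.Set.add (PySem.List.dedup l) x := by
  simp [PySem.List.dedup, PySem.Set.ofList, List.foldl_append]

-- one row preserves the invariant relating A's dict to B's entry list
theorem pvStep_inv (d : PySem.Dict String Int) (es : List (String × Int))
    (row : List (String × String))
    (h : d.items = (PySem.List.dedup (es.map Prod.fst)).map (pvF es)) :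
    (pvStepA d row).items =
      (PySem.List.dedup ((pvEntryStep es row).map Prod.fst)).map (pvF (pvEntryStep es row)) := by
  by_cases hname : pvRowName row = ""
  · simp [pvStepA, pvEntryStep, hname, h]
  · simp only [pvStepA, pvEntryStep, if_neg hname]
    generalize pvRowRank row = rank
    generalize pvRowName row = name
    have hget := pv_get?_of_inv d es name h
    have hdedup' : PySem.List.dedup (((es ++ [(name, rank)]).map Prod.fst)) =
        PySem.Set.add (PySem.List.dedup (es.map Prod.fst)) name := by
      simp only [List.map_append, List.map_cons, List.map_nil]
      exact pv_dedup_snoc _ name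
    cases hX : d.get? name with
    | none =>
      -- new name: the dict appends (name, rank); the deduped name list gains name at the end
      have hmem : name ∉ PySem.List.dedup (es.map Prod.fst) := by
        intro hm
        have hcontra := hX.symm.trans hget
        rw [if_pos hm] at hcontra
        simp at hcontra
      have hmem' : name ∉ es.map Prod.fst := fun hx => hmem (pv_mem_dedup.mpr hx)
      have hcont : d.contains name = false := by
        rw [PySem.Dict.contains_eq_isSome_get?, hX]; rfl
      have hadd : PySem.Set.add (PySem.List.dedup (es.map Prod.fst)) name =
          PySem.List.dedup (es.map Prod.fst) ++ [name] := by
        have hc : PySem.Set.contains (PySem.List.dedup (es.map Prod.fst)) name = false := by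
          simp only [PySem.Set.contains, List.contains_eq_mem, decide_eq_false_iff_not]
          exact hmem
        unfold PySem.Set.add; rw [hc]; rfl
      change (d.insert name rank).items = _
      rw [PySem.Dict.items_insert_of_not_contains d rank hcont, h, hdedup', hadd,
        List.map_append, List.map_cons, List.map_nil]
      congr 1
      · apply List.map_congr_left
        intro n hn
        have heq : ¬ name = n := fun hc => hmem (hc ▸ hn)
        simp [pvF, pvMinRank_snoc_ne es rank heq]
      · simp [pvF, pvMinRank_snoc_self_not_mem es name rank hmem']
    | some prev =>
      -- known name: the dict updates in place iff rank < prev; the deduped name list is unchanged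
      have hmem : name ∈ PySem.List.dedup (es.map Prod.fst) := by
        by_contra hm
        have hcontra := hX.symm.trans hget
        rw [if_neg hm] at hcontra
        simp at hcontra
      have hmem' : name ∈ es.map Prod.fst := pv_mem_dedup.mp hmem
      have hprev : prev = pvMinRank es name := by
        have heq := hX.symm.trans hget
        rw [if_pos hmem] at heq
        exact Option.some.inj heq
      subst hprev
      have hcont : d.contains name = true := by
        rw [PySem.Dict.contains_eq_isSome_get?, hX]; rfl
      have hadd : PySem.Set.add (PySem.List.dedup (es.map Prod.fst)) name =
          PySem.List.dedup (es.map Prod.fst) := by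
        have hc : PySem.Set.contains (PySem.List.dedup (es.map Prod.fst)) name = true := by
          simp only [PySem.Set.contains, List.contains_eq_mem, decide_eq_true_eq]
          exact hmem
        unfold PySem.Set.add; rw [hc]; rfl
      rw [hdedup', hadd]
      change (if rank < pvMinRank es name then d.insert name rank else d).items = _
      have hmin := pvMinRank_snoc_self_mem es name rank hmem'
      by_cases hlt : rank < pvMinRank es name
      · rw [if_pos hlt, PySem.Dict.items_insert_of_contains d rank hcont, h, List.map_map]
        apply List.map_congr_left
        intro n hn
        by_cases heq : n = name
        · subst heq
          simp [pvF, Function.comp, hmin, hlt]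
        · have hb : (n == name) = false := by simp [heq]
          simp [pvF, Function.comp, hb, pvMinRank_snoc_ne es rank (fun hc => heq hc.symm)]
      · rw [if_neg hlt, h]
        apply List.map_congr_left
        intro n hn
        by_cases heq : n = name
        · subst heq
          simp [pvF, hmin, hlt]
        · simp [pvF, pvMinRank_snoc_ne es rank (fun hc => heq hc.symm)]

theorem pv_fold_inv (rows : List (List (String × String))) :
    ∀ (d : PySem.Dict String Int) (es : List (String × Int)),
      d.items = (PySem.List.dedup (es.map Prod.fst)).map (pvF es) →
      (rows.foldl pvStepA d).items =
        (PySem.List.dedup ((rows.foldl pvEntryStep es).map Prod.fst)).map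
          (pvF (rows.foldl pvEntryStep es)) := by
  induction rows with
  | nil => intro d es h; simpa using h
  | cons r rs ih =>
    intro d es h
    simp only [List.foldl_cons]
    exact ih _ _ (pvStep_inv d es r h)

theorem pv_insertBy_map {α β : Type} (f : α → β) (b : β → β → Bool) (x : α) (l : List α) :
    PySem.List.insertBy b (f x) (l.map f) =
      (PySem.List.insertBy (fun p q => b (f p) (f q)) x l).map f := by
  induction l with
  | nil => rfl
  | cons y ys ih =>
    simp only [List.map_cons, PySem.List.insertBy]
    by_cases hb : b (f x) (f y) <;> simp [hb, ih]

theorem pv_foldl_insertBy_map {α β : Type} (f : α → β) (b : β → β → Bool) (l : List α) :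
    ∀ acc : List α,
    (l.map f).foldl (fun a x => PySem.List.insertBy b x a) (acc.map f) =
      (l.foldl (fun a x => PySem.List.insertBy (fun p q => b (f p) (f q)) x a) acc).map f := by
  induction l with
  | nil => intro acc; rfl
  | cons y ys ih =>
    intro acc
    simp only [List.map_cons, List.foldl_cons]
    rw [pv_insertBy_map]
    exact ih _

theorem pv_sorted2_swap (l : List (Int × String)) :
    PySem.List.sorted2 (l.map (fun p => (p.2, p.1))) (fun x => x.2) (fun x => x.1) =
      (PySem.List.sorted2 l (fun x => x.1) (fun x => x.2)).map (fun p => (p.2, p.1)) := by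
  exact pv_foldl_insertBy_map (fun p => (p.2, p.1)) _ l []

-- ===== VERDICT (by name: the statement is the Claim_ definition above) =====
theorem select_classes_from_gap_py_spec : Claim_equal_select_classes_from_gap_py := by
  intro rows tc _dom
  show select_classes_from_gap_py rows tc = select_classes_from_gap_py_alt rows tc
  simp only [select_classes_from_gap_py, select_classes_from_gap_py_alt, pvEntries]
  rw [pv_fold_inv rows PySem.Dict.empty [] rfl]
  rw [show (PySem.List.dedup ((List.foldl pvEntryStep [] rows).map Prod.fst)).map
        (pvF (List.foldl pvEntryStep [] rows)) =
      ((PySem.List.dedup ((List.foldl pvEntryStep [] rows).map Prod.fst)).map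
        (fun n => (pvMinRank (List.foldl pvEntryStep [] rows) n, n))).map
        (fun p : Int × String => (p.2, p.1)) from by rw [List.map_map]; rfl]
  rw [pv_sorted2_swap, List.map_map]
  rfl
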